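-- pv_equiv track=rewrite | github.com/AboubakrLaid/1_cs_project-hadj-pilgrim-management-platform- | server/api/lottery/algorithms/AR.py | round_robin_distribution
-- ===== SOURCE A (Python) =====
-- def round_robin_distribution(municipal_population_list, extra_seats):
--     length = len(municipal_population_list)
--     distributed_seats = [0] * length
--     i = 0
--     while extra_seats > 0:
--         j = 1
--         while i < length and extra_seats > (
--             len(municipal_population_list[i + 1 :]) * j
--         ):
--
--             distributed_seats[i] += 1
--             extra_seats -= 1
--             j += 1
--         i += 1
--
--     distributed_seats.reverse()
--     return distributed_seats
-- ===== SOURCE B (Python) =====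
-- def round_robin_distribution(municipal_population_list, extra_seats):
--     n = len(municipal_population_list)
--     rem = max(extra_seats, 0)
--     out = []
--     for i in range(n):
--         c = rem // (n - i)
--         rem -= c
--         out.append(c)
--     out.reverse()
--     return out
-- ===== Notes on version B (the rewrite author's own statement) =====
-- stated objective: faster
-- what changed: Replaces A's seat-by-seat double while loop (one iteration per extra seat) by a single pass computing each municipality's count in closed form as remaining // (seats left to fill), then reversing.
-- outside the precondition, e.g. on round_robin_distribution([], 1): A does not finish within the time limit, B returns []
import Mathlib
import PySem

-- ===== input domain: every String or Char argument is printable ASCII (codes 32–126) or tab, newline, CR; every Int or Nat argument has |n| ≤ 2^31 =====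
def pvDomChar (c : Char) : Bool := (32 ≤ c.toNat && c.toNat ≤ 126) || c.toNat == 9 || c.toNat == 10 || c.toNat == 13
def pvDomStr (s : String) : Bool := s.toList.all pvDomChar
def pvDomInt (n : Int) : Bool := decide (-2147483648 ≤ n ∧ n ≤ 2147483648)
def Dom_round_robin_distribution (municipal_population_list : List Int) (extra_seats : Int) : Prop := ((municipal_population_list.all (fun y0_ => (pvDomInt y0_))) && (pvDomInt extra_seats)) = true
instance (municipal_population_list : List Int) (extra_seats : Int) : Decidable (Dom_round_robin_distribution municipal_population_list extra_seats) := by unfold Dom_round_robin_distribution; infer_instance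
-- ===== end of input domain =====

-- B replaces A's seat-by-seat double while loop by a single pass that computes each
-- municipality's count in closed form (remaining // seats-left), asymptotically faster.


-- ===== PORT A =====
-- inner `while i < length and extra_seats > len(lst[i+1:]) * j` loop; `lst[i+1:]` with
-- i+1 ≥ 0 is exactly `List.drop (i+1)`; `distributed_seats[i] += 1` is a set at index i,
-- always in range because the guard has i < length. Fuel: extra decreases by 1 each
-- iteration and the guard needs extra > (drop-length)*j ≥ 0, so extra.toNat steps suffice.
def innerA (pop seats : List Int) (i : Nat) (extra j : Int) (fuel : Nat) :
    List Int × Int :=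
  match fuel with
  | 0 => (seats, extra)
  | Nat.succ fuel' =>
    if i < pop.length ∧ ((pop.drop (i + 1)).length : Int) * j < extra then
      innerA pop (seats.set i (seats.getD i 0 + 1)) i (extra - 1) (j + 1) fuel'
    else (seats, extra)

-- outer `while extra_seats > 0` loop. On inputs where Python terminates (list nonempty
-- or extra ≤ 0) it runs at most `length` stages, so fuel = length is exact there.
def outerA (pop seats : List Int) (extra : Int) (i : Nat) (fuel : Nat) : List Int :=
  match fuel with
  | 0 => seats
  | Nat.succ fuel' =>
    if 0 < extra then
      let p := innerA pop seats i extra 1 extra.toNat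
      outerA pop p.1 p.2 (i + 1) fuel'
    else seats

def round_robin_distribution (municipal_population_list : List Int) (extra_seats : Int) : List Int :=
  (outerA municipal_population_list
      (List.replicate municipal_population_list.length 0)
      extra_seats 0 municipal_population_list.length).reverse

-- ===== PORT B =====
-- `for i in range(n): c = rem // (n - i); rem -= c; out.append(c)` then `out.reverse()`
def altGo (n : Nat) (rem : Int) (i : Nat) (out : List Int) : List Int :=
  if _h : i < n then
    altGo n (rem - PySem.Int.floordiv rem ((n - i : Nat) : Int)) (i + 1)
      (out ++ [PySem.Int.floordiv rem ((n - i : Nat) : Int)])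
  else out
termination_by n - i

def round_robin_distribution_alt (municipal_population_list : List Int) (extra_seats : Int) : List Int :=
  (altGo municipal_population_list.length (max extra_seats 0) 0 []).reverse

-- ===== PRECONDITION & SPEC =====
-- Pre_ excludes (empty list, positive extra_seats), where Python A loops forever
-- (the outer while never makes progress); B naturally returns [] there.
def Pre_round_robin_distribution (municipal_population_list : List Int) (extra_seats : Int) : Prop :=
  municipal_population_list ≠ [] ∨ extra_seats ≤ 0
instance (municipal_population_list : List Int) (extra_seats : Int) : Decidable (Pre_round_robin_distribution municipal_population_list extra_seats) := by unfold Pre_round_robin_distribution; infer_instance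
def pvWitness_round_robin_distribution : List Int × Int := ([10, 20, 30], 7)
def Spec_round_robin_distribution (municipal_population_list : List Int) (extra_seats : Int) (out : List Int) : Prop := out = round_robin_distribution_alt municipal_population_list extra_seats
instance (municipal_population_list : List Int) (extra_seats : Int) (out : List Int) : Decidable (Spec_round_robin_distribution municipal_population_list extra_seats out) := by unfold Spec_round_robin_distribution; infer_instance

-- ===== CLAIM (what is proved, stated in full; the proofs are below) =====
def Claim_equal_round_robin_distribution : Prop := ∀ (municipal_population_list : List Int) (extra_seats : Int), Dom_round_robin_distribution municipal_population_list extra_seats → Pre_round_robin_distribution municipal_population_list extra_seats → Spec_round_robin_distribution municipal_population_list extra_seats (round_robin_distribution municipal_population_list extra_seats)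

-- ===== LEMMAS AND PROOFS =====

-- the sequence of per-municipality counts, front to back: specCounts r k lists the
-- counts for the k municipalities still to fill when r seats remain
def specCounts (r : Int) (k : Nat) : List Int :=
  match k with
  | 0 => []
  | Nat.succ k' =>
    PySem.Int.floordiv r ((k' + 1 : Nat) : Int) ::
      specCounts (r - PySem.Int.floordiv r ((k' + 1 : Nat) : Int)) k'

-- number of iterations A's inner loop performs
def takes (m : Nat) (r j : Int) (fuel : Nat) : Nat :=
  match fuel with
  | 0 => 0
  | Nat.succ fuel' => if (m : Int) * j < r then takes m (r - 1) (j + 1) fuel' + 1 else 0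

lemma set_getD_self (seats : List Int) (i : Nat) (h : i < seats.length) :
    seats.set i (seats.getD i 0) = seats := by
  rw [List.getD_eq_getElem _ _ h]
  exact List.set_getElem_self h

lemma innerA_eq_takes (pop : List Int) (i : Nat) (hi : i < pop.length) :
    ∀ (fuel : Nat) (seats : List Int) (r j : Int), i < seats.length →
      innerA pop seats i r j fuel =
        (seats.set i (seats.getD i 0 + takes ((pop.drop (i+1)).length) r j fuel),
          r - takes ((pop.drop (i+1)).length) r j fuel) := by
  intro fuel
  induction fuel with
  | zero =>
    intro seats r j h
    simp only [innerA, takes, Nat.cast_zero, add_zero, sub_zero, set_getD_self seats i h]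
  | succ fuel' ih =>
    intro seats r j h
    simp only [innerA, takes]
    by_cases hc : ((pop.drop (i + 1)).length : Int) * j < r
    · rw [if_pos ⟨hi, hc⟩, if_pos hc, ih _ _ _ (by simpa using h)]
      simp only [Prod.mk.injEq]
      constructor
      · rw [List.set_set, List.getD_eq_getElem?_getD, List.getElem?_set_self (by omega)]
        simp only [Option.getD_some]
        congr 1
        rw [List.getD_eq_getElem?_getD]
        push_cast
        ring
      · push_cast; ring
    · rw [if_neg (fun hh => hc hh.2), if_neg hc]
      simp only [Nat.cast_zero, add_zero, sub_zero, set_getD_self seats i h]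

lemma takes_closed (m : Nat) :
    ∀ (fuel : Nat) (r j : Int), 1 ≤ j → r.toNat ≤ fuel →
      (takes m r j fuel : Int) =
        max 0 (PySem.Int.floordiv (r - m * (j - 1)) ((m : Int) + 1)) := by
  intro fuel
  have hb : (0 : Int) < (m : Int) + 1 := by positivity
  induction fuel with
  | zero =>
    intro r j hj hr
    have hm : (0 : Int) ≤ (m : Int) * (j - 1) :=
      mul_nonneg (Int.natCast_nonneg m) (by omega)
    have hlt : PySem.Int.floordiv (r - m * (j - 1)) ((m : Int) + 1) < 1 :=
      (PySem.Int.floordiv_lt_iff_lt_mul hb).2 (by omega)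
    simp only [takes]
    omega
  | succ fuel' ih =>
    intro r j hj hr
    have hm : (0 : Int) ≤ (m : Int) * j := mul_nonneg (Int.natCast_nonneg m) (by omega)
    simp only [takes]
    by_cases hc : (m : Int) * j < r
    · rw [if_pos hc]
      have hih := ih (r - 1) (j + 1) (by omega) (by omega)
      have e1 : r - 1 - (m : Int) * (j + 1 - 1) = r - 1 - m * j := by ring
      rw [e1] at hih
      have h0 : 0 ≤ PySem.Int.floordiv (r - 1 - m * j) ((m : Int) + 1) :=
        (PySem.Int.le_floordiv_iff_mul_le hb).2 (by omega)
      have hadd : PySem.Int.floordiv (r - m * (j - 1)) ((m : Int) + 1)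
          = PySem.Int.floordiv (r - 1 - m * j) ((m : Int) + 1) + 1 := by
        rw [PySem.Int.floordiv_eq_ediv_of_pos hb, PySem.Int.floordiv_eq_ediv_of_pos hb]
        have e2 : r - (m : Int) * (j - 1) = (r - 1 - m * j) + 1 * ((m : Int) + 1) := by ring
        rw [e2, Int.add_mul_ediv_right _ _ (by omega)]
      push_cast
      omega
    · rw [if_neg hc]
      have hm' : (m : Int) * (j - 1) = (m : Int) * j - m := by ring
      have hlt : PySem.Int.floordiv (r - m * (j - 1)) ((m : Int) + 1) < 1 :=
        (PySem.Int.floordiv_lt_iff_lt_mul hb).2 (by omega)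
      simp only [Nat.cast_zero]
      omega

lemma getD_of_drop_replicate (l : List Int) (i k : Nat)
    (h : l.drop i = List.replicate (k + 1) 0) (hi : i < l.length) : l.getD i 0 = 0 := by
  rw [List.getD_eq_getElem _ _ hi]
  have hg : l[i] = (l.drop i)[0]'(by simp; omega) := by simp [List.getElem_drop]
  simp only [hg, h]
  simp

lemma take_succ_set (l : List Int) (i : Nat) (a : Int) (h : i < l.length) :
    (l.set i a).take (i + 1) = l.take i ++ [a] := by
  rw [List.set_eq_take_append_cons_drop, if_pos h]
  rw [show i + 1 = (l.take i).length + 1 by simp [Nat.min_eq_left h.le]]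
  rw [List.take_append]
  simp

lemma specCounts_zero (k : Nat) : specCounts 0 k = List.replicate k 0 := by
  induction k with
  | zero => rfl
  | succ k' ih => simp [specCounts, PySem.Int.floordiv, ih, List.replicate_succ]

lemma outerA_spec (pop : List Int) :
    ∀ (k i : Nat) (seats : List Int) (r : Int), i + k = pop.length →
      seats.length = pop.length → seats.drop i = List.replicate k 0 → 0 ≤ r →
      outerA pop seats r i k = seats.take i ++ specCounts r k := by
  intro k
  induction k with
  | zero =>
    intro i seats r hik hlen _ _
    simp only [outerA, specCounts, List.append_nil]
    rw [List.take_of_length_le (by omega)]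
  | succ k' ih =>
    intro i seats r hik hlen hdrop hr
    have hi : i < pop.length := by omega
    have hb : (0 : Int) < (k' : Int) + 1 := by positivity
    simp only [outerA]
    by_cases hpos : 0 < r
    · rw [if_pos hpos]
      rw [innerA_eq_takes pop i hi _ seats r 1 (by omega)]
      dsimp only
      have hmlen : (pop.drop (i + 1)).length = k' := by
        simp [List.length_drop]; omega
      rw [hmlen]
      have htk := takes_closed k' r.toNat r 1 (by omega) (by omega)
      have e1 : r - (k' : Int) * (1 - 1) = r := by ring
      rw [e1] at htk
      have h0 : 0 ≤ PySem.Int.floordiv r ((k' : Int) + 1) :=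
        (PySem.Int.le_floordiv_iff_mul_le hb).2 (by omega)
      set c := PySem.Int.floordiv r ((k' : Int) + 1) with hc
      have htk' : ((takes k' r 1 r.toNat : Nat) : Int) = c := by omega
      have hcler : c ≤ r := by
        rw [hc, PySem.Int.floordiv_eq_ediv_of_pos hb]
        exact Int.ediv_le_self _ hr
      have hg0 : seats.getD i 0 = 0 := getD_of_drop_replicate seats i k' hdrop (by omega)
      rw [htk', hg0, zero_add]
      have hdrop' : (seats.set i c).drop (i + 1) = List.replicate k' 0 := by
        rw [List.drop_set, if_pos (by omega)]
        have : seats.drop (i + 1) = (seats.drop i).drop 1 := by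
          rw [List.drop_drop]
        rw [this, hdrop]
        simp [List.replicate_succ]
      rw [ih (i + 1) (seats.set i c) (r - c) (by omega) (by simpa using hlen) hdrop'
        (by omega)]
      rw [take_succ_set seats i c (by omega)]
      have hcast : ((k' + 1 : Nat) : Int) = (k' : Int) + 1 := by push_cast; ring
      simp only [specCounts, hcast, ← hc, List.append_assoc, List.cons_append,
        List.nil_append]
    · rw [if_neg hpos]
      have hr0 : r = 0 := by omega
      rw [hr0, specCounts_zero, ← hdrop, List.take_append_drop]

lemma altGo_spec (n : Nat) :
    ∀ (k i : Nat) (r : Int) (out : List Int), i + k = n →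
      altGo n r i out = out ++ specCounts r k := by
  intro k
  induction k with
  | zero =>
    intro i r out hik
    rw [altGo]
    simp [specCounts, show ¬ i < n by omega]
  | succ k' ih =>
    intro i r out hik
    rw [altGo]
    rw [dif_pos (by omega : i < n)]
    have hnk : n - i = k' + 1 := by omega
    rw [hnk, ih (i + 1) _ _ (by omega)]
    simp [specCounts]

lemma outerA_nonpos (pop seats : List Int) (r : Int) (i fuel : Nat) (h : ¬ 0 < r) :
    outerA pop seats r i fuel = seats := by
  cases fuel with
  | zero => rfl
  | succ fuel' => simp only [outerA, if_neg h]

-- ===== VERDICT (by name: the statement is the Claim_ definition above) =====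
theorem round_robin_distribution_spec : Claim_equal_round_robin_distribution := by
  intro pop extra _hDom hPre
  unfold Spec_round_robin_distribution round_robin_distribution round_robin_distribution_alt
  by_cases hpos : 0 < extra
  · have hne : pop ≠ [] := by
      rcases hPre with h | h
      · exact h
      · omega
    have hmax : max extra 0 = extra := by omega
    rw [hmax]
    rw [outerA_spec pop pop.length 0 (List.replicate pop.length 0) extra (by omega)
      (by simp) (by simp) (by omega)]
    rw [altGo_spec pop.length pop.length 0 extra [] (by omega)]
    simp
  · have hmax : max extra 0 = 0 := by omega
    rw [hmax, outerA_nonpos _ _ _ _ _ hpos,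
      altGo_spec pop.length pop.length 0 0 [] (by omega), specCounts_zero]
    simp
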